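-- pv_equiv track=rewrite | github.com/aniketagr0706-ctrl/AI_Assignment-04 | crypt-arithmetic.py | cols_ok
-- ===== SOURCE A (Python) =====
-- letter_vars = ['F', 'T', 'U', 'W', 'R', 'O']
--
-- def cols_ok(a):
--     if all(k in a for k in ['O', 'R', 'C1']):
--         if a['O'] + a['O'] != a['R'] + 10 * a['C1']:
--             return False
--
--     if all(k in a for k in ['W', 'U', 'C1', 'C2']):
--         if a['W'] + a['W'] + a['C1'] != a['U'] + 10 * a['C2']:
--             return False
--
--     if all(k in a for k in ['T', 'O', 'C2', 'C3']):
--         if a['T'] + a['T'] + a['C2'] != a['O'] + 10 * a['C3']: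
--             return False
--
--     if 'C3' in a and 'F' in a:
--         if a['C3'] != a['F']:
--             return False
--
--     if a.get('T') == 0 or a.get('F') == 0:
--         return False
--
--     assigned_letters = [a[l] for l in letter_vars if l in a]
--     if len(assigned_letters) != len(set(assigned_letters)):
--         return False
--
--     return True
-- ===== SOURCE B (Python) =====
-- letter_vars = ['F', 'T', 'U', 'W', 'R', 'O']
--
-- def _distinct(xs):
--     # recursive all-pairs distinctness
--     return (not xs) or (xs[0] not in xs[1:] and _distinct(xs[1:]))
--
-- def cols_ok(a):
--     # fetch every relevant value once, as optionals (None = unassigned)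
--     F, T, U, W, R, O = (a.get(l) for l in letter_vars)
--     C1, C2, C3 = a.get('C1'), a.get('C2'), a.get('C3')
--
--     def col(parts, res, carry):
--         # a column constraint applies only once every value it mentions is assigned
--         if any(v is None for v in parts + [res, carry]):
--             return True
--         return sum(parts) == res + 10 * carry
--
--     if not (col([O, O], R, C1) and col([W, W, C1], U, C2)
--             and col([T, T, C2], O, C3) and col([C3], F, 0)):
--         return False
--     if T == 0 or F == 0:
--         return False
--     return _distinct([v for v in (F, T, U, W, R, O) if v is not None])
-- ===== Notes on version B (the rewrite author's own statement) =====
-- stated objective: alternative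
-- what changed: B pre-fetches every relevant value once as optionals instead of testing membership and then indexing the dict per constraint, validates the columns through a short-circuit conjunction of a uniform optional-valued column helper, and replaces the set-cardinality uniqueness test by a recursive all-pairs distinctness check.
import Mathlib
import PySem

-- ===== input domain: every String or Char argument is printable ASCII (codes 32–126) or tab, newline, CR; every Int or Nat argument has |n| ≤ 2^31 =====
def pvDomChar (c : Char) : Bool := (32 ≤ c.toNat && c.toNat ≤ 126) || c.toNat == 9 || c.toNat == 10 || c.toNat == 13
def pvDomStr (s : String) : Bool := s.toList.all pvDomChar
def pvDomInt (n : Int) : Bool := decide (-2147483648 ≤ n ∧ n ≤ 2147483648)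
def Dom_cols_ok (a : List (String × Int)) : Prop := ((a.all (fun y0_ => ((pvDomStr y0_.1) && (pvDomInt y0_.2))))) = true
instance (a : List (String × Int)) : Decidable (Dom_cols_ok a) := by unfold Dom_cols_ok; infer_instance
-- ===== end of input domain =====

-- B pre-fetches the nine values once as optionals, checks the columns through a uniform
-- optional-valued helper, and tests uniqueness by recursive all-pairs distinctness; objective: alternative.

-- ===== PORT A =====
def pvLetterVars : List String := ["F", "T", "U", "W", "R", "O"]

def cols_ok (a : List (String × Int)) : Bool :=
  let d := PySem.Dict.ofList a
  if (["O", "R", "C1"].all (fun k => PySem.Dict.contains d k)) &&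
      decide (PySem.Dict.getD d "O" 0 + PySem.Dict.getD d "O" 0 ≠
        PySem.Dict.getD d "R" 0 + 10 * PySem.Dict.getD d "C1" 0) then false
  else if (["W", "U", "C1", "C2"].all (fun k => PySem.Dict.contains d k)) &&
      decide (PySem.Dict.getD d "W" 0 + PySem.Dict.getD d "W" 0 + PySem.Dict.getD d "C1" 0 ≠
        PySem.Dict.getD d "U" 0 + 10 * PySem.Dict.getD d "C2" 0) then false
  else if (["T", "O", "C2", "C3"].all (fun k => PySem.Dict.contains d k)) &&
      decide (PySem.Dict.getD d "T" 0 + PySem.Dict.getD d "T" 0 + PySem.Dict.getD d "C2" 0 ≠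
        PySem.Dict.getD d "O" 0 + 10 * PySem.Dict.getD d "C3" 0) then false
  else if (PySem.Dict.contains d "C3" && PySem.Dict.contains d "F") &&
      decide (PySem.Dict.getD d "C3" 0 ≠ PySem.Dict.getD d "F" 0) then false
  else if (PySem.Dict.get? d "T" == some 0) || (PySem.Dict.get? d "F" == some 0) then false
  else
    let assigned := (pvLetterVars.filter (fun l => PySem.Dict.contains d l)).map
      (fun l => PySem.Dict.getD d l 0)
    if assigned.length ≠ (PySem.Set.ofList assigned).length then false
    else true

-- ===== PORT B =====
-- '(not xs) or (xs[0] not in xs[1:] and _distinct(xs[1:]))' as structural recursion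
def pvDistinct : List Int → Bool
  | [] => true
  | x :: t => !(t.contains x) && pvDistinct t

-- col(parts, res, carry): skipped unless every mentioned value is assigned; the sum is
-- taken over the (then all-some) parts, so '.getD 0' under the guard is exact.
def pvCol (parts : List (Option Int)) (res carry : Option Int) : Bool :=
  if (parts ++ [res, carry]).any (fun v => v.isNone) then true
  else decide ((parts.map (fun v => v.getD 0)).sum = res.getD 0 + 10 * carry.getD 0)

def cols_ok_alt (a : List (String × Int)) : Bool :=
  let d := PySem.Dict.ofList a
  let F := PySem.Dict.get? d "F"
  let T := PySem.Dict.get? d "T"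
  let U := PySem.Dict.get? d "U"
  let W := PySem.Dict.get? d "W"
  let R := PySem.Dict.get? d "R"
  let O := PySem.Dict.get? d "O"
  let C1 := PySem.Dict.get? d "C1"
  let C2 := PySem.Dict.get? d "C2"
  let C3 := PySem.Dict.get? d "C3"
  if !(pvCol [O, O] R C1 && pvCol [W, W, C1] U C2 &&
       pvCol [T, T, C2] O C3 && pvCol [C3] F (some 0)) then false
  else if (T == some 0) || (F == some 0) then false
  else pvDistinct ([F, T, U, W, R, O].filterMap id)

-- ===== PRECONDITION & SPEC =====
def Spec_cols_ok (a : List (String × Int)) (out : Bool) : Prop := out = cols_ok_alt a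
instance (a : List (String × Int)) (out : Bool) : Decidable (Spec_cols_ok a out) := by unfold Spec_cols_ok; infer_instance

-- ===== CLAIM (what is proved, stated in full; the proofs are below) =====
def Claim_equal_cols_ok : Prop := ∀ (a : List (String × Int)), Dom_cols_ok a → Spec_cols_ok a (cols_ok a)

-- ===== LEMMAS AND PROOFS =====

lemma pvDistinct_iff (xs : List Int) : pvDistinct xs = true ↔ xs.Nodup := by
  induction xs with
  | nil => simp [pvDistinct]
  | cons x t ih => simp [pvDistinct, ih, List.nodup_cons]

lemma pvLenSet_iff (xs : List Int) :
    xs.length = (PySem.Set.ofList xs).length ↔ xs.Nodup := by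
  constructor
  · intro h
    have hsub : List.Subperm (PySem.Set.ofList xs) xs :=
      List.subperm_of_subset (PySem.Set.nodup_ofList xs)
        (fun x hx => (PySem.Set.mem_ofList xs x).1 hx)
    have hperm : (PySem.Set.ofList xs).Perm xs :=
      hsub.perm_of_length_le (le_of_eq h)
    exact hperm.nodup_iff.1 (PySem.Set.nodup_ofList xs)
  · intro h
    rw [PySem.Set.ofList_eq_self_of_nodup xs h]

lemma pvFilterMap_map (d : PySem.Dict String Int) (ls : List String) :
    (ls.map (fun l => PySem.Dict.get? d l)).filterMap id =
      (ls.filter (fun l => PySem.Dict.contains d l)).map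
        (fun l => PySem.Dict.getD d l 0) := by
  induction ls with
  | nil => simp
  | cons l t ih =>
    have hc : PySem.Dict.contains d l = (PySem.Dict.get? d l).isSome :=
      PySem.Dict.contains_eq_isSome_get? d l
    cases hl : PySem.Dict.get? d l with
    | none =>
      simp only [List.map_cons, List.filterMap_cons, id, List.filter_cons, hc, hl,
        Option.isSome_none, Bool.false_eq_true, if_false]
      simpa using ih
    | some v =>
      simp only [List.map_cons, List.filterMap_cons, id, List.filter_cons, hc, hl,
        Option.isSome_some, if_true, List.cons.injEq,
        PySem.Dict.getD_eq_get?_getD, Option.getD_some, true_and]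
      rw [show (List.map (fun l => (d.get? l).getD 0) (List.filter (fun l => d.contains l) t))
            = List.map (fun l => d.getD l 0) (List.filter (fun l => d.contains l) t) from
          List.map_congr_left (fun l _ => (PySem.Dict.getD_eq_get?_getD d l 0).symm)]
      simpa using ih

lemma pvChain (m1 m2 m3 m4 b1 b2 b3 b4 : Bool) (p1 p2 p3 p4 q1 q2 q3 q4 : Prop)
    [Decidable p1] [Decidable p2] [Decidable p3] [Decidable p4]
    [Decidable q1] [Decidable q2] [Decidable q3] [Decidable q4] (t u : Bool)
    (hm1 : m1 = !b1) (hm2 : m2 = !b2) (hm3 : m3 = !b3) (hm4 : m4 = !b4)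
    (hp1 : p1 ↔ q1) (hp2 : p2 ↔ q2) (hp3 : p3 ↔ q3) (hp4 : p4 ↔ q4) (ht : t = u) :
    (if m1 && decide ¬p1 then false
     else if m2 && decide ¬p2 then false
     else if m3 && decide ¬p3 then false
     else if m4 && decide ¬p4 then false
     else t)
    = (if !((((if b1 then true else decide q1) &&
              (if b2 then true else decide q2)) &&
             (if b3 then true else decide q3)) &&
            (if b4 then true else decide q4))
       then false else u) := by
  subst hm1 hm2 hm3 hm4 ht
  simp only [← hp1, ← hp2, ← hp3, ← hp4]
  cases b1 <;> cases b2 <;> cases b3 <;> cases b4 <;>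
    by_cases h1 : p1 <;> by_cases h2 : p2 <;> by_cases h3 : p3 <;> by_cases h4 : p4 <;>
      simp [h1, h2, h3, h4]

-- ===== VERDICT (by name: the statement is the Claim_ definition above) =====
theorem cols_ok_spec : Claim_equal_cols_ok := by
  intro a _
  unfold Spec_cols_ok cols_ok cols_ok_alt pvCol
  simp only [List.cons_append, List.nil_append, List.any_cons, List.any_nil,
    List.map, List.sum_cons, List.sum_nil, add_zero, Bool.or_false, List.all_cons, List.all_nil, Bool.and_true]
  set d := PySem.Dict.ofList a with hd
  rw [show ([PySem.Dict.get? d "F", PySem.Dict.get? d "T", PySem.Dict.get? d "U",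
      PySem.Dict.get? d "W", PySem.Dict.get? d "R", PySem.Dict.get? d "O"] : List (Option Int))
      = pvLetterVars.map (fun l => PySem.Dict.get? d l) from rfl, pvFilterMap_map]
  simp only [PySem.Dict.contains_eq_isSome_get?, PySem.Dict.getD_eq_get?_getD,
    Option.isNone_some, Option.getD_some, Bool.or_false, mul_zero, add_zero]
  generalize (pvLetterVars.filter (fun l => (PySem.Dict.get? d l).isSome)).map
      (fun l => (PySem.Dict.get? d l).getD 0) = vals
  apply pvChain
  · cases PySem.Dict.get? d "O" <;> cases PySem.Dict.get? d "R" <;>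
      cases PySem.Dict.get? d "C1" <;> simp
  · cases PySem.Dict.get? d "W" <;> cases PySem.Dict.get? d "U" <;>
      cases PySem.Dict.get? d "C1" <;> cases PySem.Dict.get? d "C2" <;> simp
  · cases PySem.Dict.get? d "T" <;> cases PySem.Dict.get? d "O" <;>
      cases PySem.Dict.get? d "C2" <;> cases PySem.Dict.get? d "C3" <;> simp
  · cases PySem.Dict.get? d "C3" <;> cases PySem.Dict.get? d "F" <;> simp
  · omega
  · omega
  · omega
  · omega
  · by_cases hg : ((PySem.Dict.get? d "T" == some 0) || (PySem.Dict.get? d "F" == some 0)) = true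
    · simp [hg]
    · simp only [if_neg hg]
      by_cases hn : vals.Nodup
      · rw [if_neg (by simpa using (pvLenSet_iff vals).mpr hn), (pvDistinct_iff vals).mpr hn]
      · rw [if_pos (by simpa using fun h => hn ((pvLenSet_iff vals).mp h))]
        exact (Bool.eq_false_iff.mpr (fun h => hn ((pvDistinct_iff vals).mp h))).symm
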